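-- pv_equiv track=rewrite | github.com/ZongjingLi/MetaLearner | test.py | calculate_coefficients
-- ===== SOURCE A (Python) =====
-- def calculate_coefficients(n_terms):
--     """
--     Calculate coefficients for the power series expansion of f(x) = 2/(3x^2-4x+1)
--     using the recurrence relation.
--     """
--     a = [0] * n_terms
--     a[0] = 2  # First coefficient
--
--     if n_terms > 1:
--         a[1] = 4 * a[0]  # Second coefficient: 4*2 = 8
--
--     # Apply recurrence relation: a_n = 4*a_{n-1} - 3*a_{n-2}
--     for i in range(2, n_terms):
--         a[i] = 4 * a[i-1] - 3 * a[i-2]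
--
--     return a
-- ===== SOURCE B (Python) =====
-- def calculate_coefficients(n_terms):
--     # Closed form: a_i = 3**(i+1) - 1, maintained as an incremental power of three.
--     coeffs = []
--     p = 3
--     for _ in range(n_terms):
--         coeffs.append(p - 1)
--         p *= 3
--     return coeffs
-- ===== Notes on version B (the rewrite author's own statement) =====
-- stated objective: alternative
-- what changed: Replaces the two-term linear recurrence a_i = 4*a_{i-1} - 3*a_{i-2} over a preallocated mutated array with a single append-only pass emitting the closed form a_i = 3^(i+1) - 1 via an incrementally maintained power of three, so no coefficient depends on earlier list entries.
import Mathlib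
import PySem

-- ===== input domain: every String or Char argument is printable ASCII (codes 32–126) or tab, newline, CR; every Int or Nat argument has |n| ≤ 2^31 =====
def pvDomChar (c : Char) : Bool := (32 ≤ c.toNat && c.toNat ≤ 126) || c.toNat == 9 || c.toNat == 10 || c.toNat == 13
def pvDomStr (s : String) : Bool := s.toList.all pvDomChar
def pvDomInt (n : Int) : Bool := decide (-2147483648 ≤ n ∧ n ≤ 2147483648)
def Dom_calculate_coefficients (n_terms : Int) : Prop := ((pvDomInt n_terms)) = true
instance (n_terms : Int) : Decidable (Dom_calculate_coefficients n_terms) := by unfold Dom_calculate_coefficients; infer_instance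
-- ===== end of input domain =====

-- B replaces A's two-term recurrence over a preallocated mutated array with an append-only
-- pass emitting the closed form a_i = 3^(i+1) - 1 via an incremental power of three (alternative).

-- ===== PORT A =====
def calculate_coefficients (n_terms : Int) : List Int :=
  let a := List.replicate n_terms.toNat (0 : Int)   -- a = [0] * n_terms
  let a := PySem.List.pySetD a 0 2                  -- a[0] = 2  (IndexError when n_terms <= 0: excluded by Pre_)
  let a := if n_terms > 1 then PySem.List.pySetD a 1 (4 * PySem.List.pyGetD a 0 0) else a
  (PySem.List.pyRange 2 n_terms 1).foldl
    (fun a i =>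
      PySem.List.pySetD a i (4 * PySem.List.pyGetD a (i - 1) 0 - 3 * PySem.List.pyGetD a (i - 2) 0)) a

-- ===== PORT B =====
def calculate_coefficients_alt (n_terms : Int) : List Int :=
  ((PySem.List.pyRange 0 n_terms 1).foldl
    (fun (st : List Int × Int) _ => (st.1 ++ [st.2 - 1], st.2 * 3)) ([], 3)).1

-- ===== PRECONDITION & SPEC =====
-- Pre_ excludes exactly n_terms <= 0, where A raises IndexError on a[0] = 2.
def Pre_calculate_coefficients (n_terms : Int) : Prop := 1 ≤ n_terms
instance (n_terms : Int) : Decidable (Pre_calculate_coefficients n_terms) := by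
  unfold Pre_calculate_coefficients; infer_instance
def pvWitness_calculate_coefficients : Int := 4

def Spec_calculate_coefficients (n_terms : Int) (out : List Int) : Prop :=
  out = calculate_coefficients_alt n_terms
instance (n_terms : Int) (out : List Int) : Decidable (Spec_calculate_coefficients n_terms out) := by
  unfold Spec_calculate_coefficients; infer_instance

-- ===== CLAIM (what is proved, stated in full; the proofs are below) =====
def Claim_equal_calculate_coefficients : Prop :=
  ∀ (n_terms : Int), Dom_calculate_coefficients n_terms →
    Pre_calculate_coefficients n_terms →
    Spec_calculate_coefficients n_terms (calculate_coefficients n_terms)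

-- ===== LEMMAS AND PROOFS =====

-- the closed-form coefficient a_i = 3^(i+1) - 1
def ccCoef (j : Nat) : Int := 3 ^ (j + 1) - 1

-- the array state of A after positions < k have been filled (others still 0)
def ccMix (m k : Nat) : List Int :=
  (List.range m).map (fun j => if j < k then ccCoef j else 0)

theorem ccMix_getD {m k : Nat} (j : Nat) (hj : j < m) :
    (ccMix m k).getD j 0 = if j < k then ccCoef j else 0 := by
  simpa [ccMix] using PySem.List.getD_map_range (fun j => if j < k then ccCoef j else 0) m j 0 hj

theorem ccMix_set {m k : Nat} (_hk : k < m) :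
    (ccMix m k).set k (ccCoef k) = ccMix m (k + 1) := by
  apply List.ext_getElem
  · simp [ccMix]
  · intro j h1 h2
    simp only [ccMix, List.getElem_set, List.getElem_map, List.getElem_range]
    by_cases hj : k = j
    · subst hj; simp
    · simp only [if_neg hj]
      by_cases hjk : j < k
      · simp [hjk, Nat.lt_succ_of_lt hjk]
      · have h' : ¬ j < k + 1 := by omega
        simp [hjk, h']

theorem ccCoef_rec (k : Nat) (hk : 2 ≤ k) :
    4 * ccCoef (k - 1) - 3 * ccCoef (k - 2) = ccCoef k := by
  unfold ccCoef
  have h1 : k - 1 + 1 = k := by omega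
  have h2 : (k - 2) + 1 = k - 1 := by omega
  have h3 : (3 : Int) ^ (k - 1) * 3 = 3 ^ k := by
    rw [← pow_succ, h1]
  rw [h1, h2]
  have : (3 : Int) ^ (k + 1) = 3 ^ k * 3 := by rw [pow_succ]
  rw [this, ← h3]
  ring

-- one fold step of A, on the characterized state
theorem ccStep (m k : Nat) (h2 : 2 ≤ k) (hk : k < m) :
    PySem.List.pySetD (ccMix m k) (k : Int)
      (4 * PySem.List.pyGetD (ccMix m k) ((k : Int) - 1) 0 -
        3 * PySem.List.pyGetD (ccMix m k) ((k : Int) - 2) 0) = ccMix m (k + 1) := by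
  have e1 : (k : Int) - 1 = ((k - 1 : Nat) : Int) := by omega
  have e2 : (k : Int) - 2 = ((k - 2 : Nat) : Int) := by omega
  rw [e1, e2, PySem.List.pyGetD_natCast, PySem.List.pyGetD_natCast,
    ccMix_getD (k - 1) (by omega), ccMix_getD (k - 2) (by omega),
    if_pos (by omega : k - 1 < k), if_pos (by omega : k - 2 < k),
    ccCoef_rec k h2, PySem.List.pySetD_natCast, ccMix_set hk]

-- A's fold carries the characterized state to completion
theorem ccFoldA (m : Nat) : ∀ (d k : Nat), 2 ≤ k → k + d = m →
    (PySem.List.pyRange (k : Int) (m : Int) 1).foldl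
      (fun a i =>
        PySem.List.pySetD a i (4 * PySem.List.pyGetD a (i - 1) 0 - 3 * PySem.List.pyGetD a (i - 2) 0))
      (ccMix m k) = ccMix m m := by
  intro d
  induction d with
  | zero =>
    intro k h2 hkm
    have hkm2 : k = m := by omega
    subst hkm2
    simp [PySem.List.pyRange]
  | succ d ih =>
    intro k h2 hkm
    have hlt : (k : Int) < (m : Int) := by omega
    rw [PySem.List.pyRange_one_cons hlt]
    simp only [List.foldl_cons]
    rw [ccStep m k h2 (by omega)]
    have : (k : Int) + 1 = ((k + 1 : Nat) : Int) := by omega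
    rw [this]
    exact ih (k + 1) (by omega) (by omega)

-- B's fold appends closed-form values
theorem ccFoldB {α : Type} (L : List α) : ∀ (acc : List Int) (p : Int),
    (L.foldl (fun (st : List Int × Int) _ => (st.1 ++ [st.2 - 1], st.2 * 3)) (acc, p)).1 =
      acc ++ (List.range L.length).map (fun i => p * 3 ^ i - 1) := by
  induction L with
  | nil => intro acc p; simp
  | cons x L ih =>
    intro acc p
    simp only [List.foldl_cons, List.length_cons, List.range_succ_eq_map, List.map_cons,
      List.map_map]
    rw [ih]
    simp only [pow_zero, mul_one, List.append_assoc, List.singleton_append]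
    congr 2
    apply List.map_congr_left
    intro i _
    simp only [Function.comp_apply, pow_succ]
    ring

theorem ccB_closed (m : Nat) :
    calculate_coefficients_alt (m : Int) = (List.range m).map ccCoef := by
  unfold calculate_coefficients_alt
  rw [PySem.List.pyRange_zero_natCast, ccFoldB]
  simp only [List.length_map, List.length_range, List.nil_append]
  apply List.map_congr_left
  intro i _
  simp only [ccCoef, pow_succ]
  ring

-- A's initial state (the [0]*m array after a[0]=2 and, for m ≥ 2, a[1]=8) is ccMix m 2
theorem ccInit (m : Nat) (hm : 2 ≤ m) :
    PySem.List.pySetD (PySem.List.pySetD (List.replicate m (0 : Int)) 0 2) 1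
      (4 * PySem.List.pyGetD (PySem.List.pySetD (List.replicate m (0 : Int)) 0 2) 0 0) =
      ccMix m 2 := by
  have h0 : (0 : Int) = ((0 : Nat) : Int) := rfl
  have h1 : (1 : Int) = ((1 : Nat) : Int) := rfl
  rw [h0, h1]
  simp only [PySem.List.pySetD_natCast, PySem.List.pyGetD_natCast]
  simp only [Nat.cast_zero]
  apply List.ext_getElem
  · simp [ccMix]
  · intro j hj _
    simp only [List.length_set, List.length_replicate] at hj
    simp only [List.getElem_set, List.getElem_replicate, ccMix, List.getElem_map,
      List.getElem_range]
    have hget : (List.replicate m (0 : Int)).set 0 2 = 2 :: List.replicate (m - 1) 0 := by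
      cases m with
      | zero => omega
      | succ n => simp [List.replicate_succ]
    rw [hget]
    by_cases hj1 : j = 1
    · subst hj1; simp [ccCoef]
    · by_cases hj0 : j = 0
      · subst hj0; simp [ccCoef]
      · have h2' : ¬ j < 2 := by omega
        rw [if_neg (by omega), if_neg (by omega), if_neg h2']

-- ===== VERDICT (by name: the statement is the Claim_ definition above) =====
theorem calculate_coefficients_spec : Claim_equal_calculate_coefficients := by
  intro n_terms _ hpre
  unfold Spec_calculate_coefficients
  obtain ⟨m, rfl⟩ : ∃ m : Nat, n_terms = (m : Int) :=
    ⟨n_terms.toNat, (Int.toNat_of_nonneg (by exact le_trans (by norm_num) hpre)).symm⟩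
  unfold Pre_calculate_coefficients at hpre
  have hm : 1 ≤ m := by exact_mod_cast hpre
  rw [ccB_closed]
  unfold calculate_coefficients
  simp only [Int.toNat_natCast]
  by_cases h2 : 2 ≤ m
  · rw [if_pos (by exact_mod_cast (by omega : (1 : Int) < (m : Int)))]
    rw [ccInit m h2]
    have hfold := ccFoldA m (m - 2) 2 le_rfl (by omega)
    push_cast at hfold
    rw [hfold]
    unfold ccMix
    apply List.map_congr_left
    intro j hj
    rw [if_pos (List.mem_range.mp hj)]
  · have hm1 : m = 1 := by omega
    subst hm1
    norm_num
    decide
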